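-- pv_equiv track=rewrite | github.com/akhilub/DSA-Coding-Patterns | Graph/C_2_LC_261_Graph_Valid_Tree/test.py | getDeviceStates
-- ===== SOURCE A (Python) =====
-- def getDeviceStates(devices, commands):
--     # Let's track each toggle explicitly
--     deviceStates = {}
--
--     # Initialize all devices to OFF
--     for device in devices:
--         deviceStates[device] = 0
--
--     # Let's count toggles for Test Case 2:
--     # [10, 20, 30, 30, 20, 10, 10]
--     # Device 10: 3 toggles -> OFF
--     # Device 20: 2 toggles -> ON
--     # Device 30: 2 toggles -> OFF
--     for command in commands:
--         if command in deviceStates: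
--             deviceStates[command] = not deviceStates[command]
--
--     return sorted([device for device, state in deviceStates.items() if state])
-- ===== SOURCE B (Python) =====
-- def getDeviceStates(devices, commands):
--     # Sort the device-relevant commands once, then a single run-length scan
--     # over the sorted list: a value whose run has odd length is ON.  The
--     # output comes out already sorted; no per-device state dict is kept.
--     dset = set(devices)
--     relevant = sorted(c for c in commands if c in dset)
--     on = []
--     i, n = 0, len(relevant)
--     while i < n:
--         j = i + 1
--         while j < n and relevant[j] == relevant[i]:
--             j += 1
--         if (j - i) % 2 == 1:
--             on.append(relevant[i])
--         i = j
--     return on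
-- ===== Notes on version B (the rewrite author's own statement) =====
-- stated objective: alternative
-- what changed: Replaces the per-device toggle dictionary (init every device OFF, flip on each command, finally sort the ON keys) with a dict-free sort-then-scan: sort the device-relevant commands once and run-length scan the sorted list, emitting each value whose run has odd length, so the sorted output is built directly.
import Mathlib
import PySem

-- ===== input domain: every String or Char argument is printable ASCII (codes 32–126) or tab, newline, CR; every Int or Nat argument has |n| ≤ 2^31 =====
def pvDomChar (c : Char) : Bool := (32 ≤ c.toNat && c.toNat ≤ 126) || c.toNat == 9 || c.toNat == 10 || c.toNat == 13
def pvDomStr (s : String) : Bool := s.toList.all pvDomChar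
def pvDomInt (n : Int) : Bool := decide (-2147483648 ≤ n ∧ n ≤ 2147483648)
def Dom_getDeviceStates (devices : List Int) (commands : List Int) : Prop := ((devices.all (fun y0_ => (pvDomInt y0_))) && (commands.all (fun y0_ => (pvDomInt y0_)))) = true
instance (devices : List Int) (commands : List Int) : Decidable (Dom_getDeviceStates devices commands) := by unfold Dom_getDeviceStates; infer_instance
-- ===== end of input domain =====

-- B replaces A's per-device toggle dictionary (flip on each command, sort the ON
-- keys at the end) with a dict-free sort-then-run-length-scan over the
-- device-relevant commands (alternative decomposition, similar cost).

-- ===== PORT A =====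
-- dict values: Python stores 0 then booleans; truthiness of 0 is False, so Bool is exact.
def getDeviceStates (devices : List Int) (commands : List Int) : List Int :=
  PySem.List.sorted
    ((((commands.foldl (fun d command =>
          if d.contains command then d.insert command (! d.getD command false) else d)
        (devices.foldl (fun d device => d.insert device false) PySem.Dict.empty)).items.filter
        (fun p => p.2)).map (fun p => p.1)))
    (fun x => x) false

-- ===== PORT B =====
-- termination helper for the run-length scan (cited by decreasing_by)
theorem pvDropWhile_len_lt (x : Int) (xs : List Int) (p : Int → Bool) :
    (xs.dropWhile p).length < (x :: xs).length :=
  Nat.lt_succ_of_le (xs.dropWhile_sublist p).length_le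

-- the outer while loop of Source B: each step consumes one run (inner while = takeWhile)
-- and appends the run's value iff the run length (j - i) is odd
def pvScan : List Int → List Int
  | [] => []
  | x :: xs =>
    let run := xs.takeWhile (· == x)
    let rest := xs.dropWhile (· == x)
    if (1 + run.length) % 2 == 1 then x :: pvScan rest else pvScan rest
termination_by l => l.length
decreasing_by all_goals exact pvDropWhile_len_lt x xs _

def getDeviceStates_alt (devices : List Int) (commands : List Int) : List Int :=
  let dset := PySem.Set.ofList devices
  let relevant := PySem.List.sorted (commands.filter (fun c => PySem.Set.contains dset c)) (fun x => x) false
  pvScan relevant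

-- ===== PRECONDITION & SPEC =====
def Spec_getDeviceStates (devices : List Int) (commands : List Int) (out : List Int) : Prop := out = getDeviceStates_alt devices commands
instance (devices : List Int) (commands : List Int) (out : List Int) : Decidable (Spec_getDeviceStates devices commands out) := by unfold Spec_getDeviceStates; infer_instance

-- ===== CLAIM (what is proved, stated in full; the proofs are below) =====
def Claim_equal_getDeviceStates : Prop := ∀ (devices : List Int) (commands : List Int), Dom_getDeviceStates devices commands → Spec_getDeviceStates devices commands (getDeviceStates devices commands)

-- ===== LEMMAS AND PROOFS =====

-- ---- A-side: A's result is sorted(filter odd-count over set(devices)) ----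

def pvStep (d : PySem.Dict Int Bool) (command : Int) : PySem.Dict Int Bool :=
  if d.contains command then d.insert command (! d.getD command false) else d

lemma pvStep_keys (d : PySem.Dict Int Bool) (c : Int) : (pvStep d c).keys = d.keys := by
  unfold pvStep
  split_ifs with h
  · exact PySem.Dict.keys_insert_of_contains d _ h
  · rfl

lemma pvFold_keys (cs : List Int) (d : PySem.Dict Int Bool) :
    (cs.foldl pvStep d).keys = d.keys := by
  induction cs generalizing d with
  | nil => rfl
  | cons c cs ih => simpa [List.foldl, pvStep_keys] using ih (pvStep d c)

lemma pvFold_getD (cs : List Int) (d : PySem.Dict Int Bool) (k : Int)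
    (hk : d.contains k = true) :
    (cs.foldl pvStep d).getD k false = xor (d.getD k false) (cs.count k % 2 == 1) := by
  induction cs generalizing d with
  | nil => simp
  | cons c cs ih =>
    have hk' : (pvStep d c).contains k = true := by
      rw [PySem.Dict.contains_iff_mem_keys, pvStep_keys]
      exact (PySem.Dict.contains_iff_mem_keys d k).mp hk
    rw [List.foldl_cons, ih (pvStep d c) hk']
    by_cases hck : c = k
    · subst hck
      have : (pvStep d c).getD c false = ! d.getD c false := by
        unfold pvStep
        rw [if_pos hk]
        exact PySem.Dict.getD_insert_self d c _ false
      rw [this]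
      rcases Nat.even_or_odd (cs.count c) with he | ho
      · have h2 : cs.count c % 2 = 0 := Nat.even_iff.mp he
        have h3 : (cs.count c + 1) % 2 = 1 := by omega
        simp [h2, h3]
      · have h2 : cs.count c % 2 = 1 := Nat.odd_iff.mp ho
        have h3 : (cs.count c + 1) % 2 = 0 := by omega
        simp [h2, h3]
    · have hval : (pvStep d c).getD k false = d.getD k false := by
        unfold pvStep
        split_ifs with h
        · exact PySem.Dict.getD_insert_of_ne d _ false (fun h' => hck h'.symm)
        · rfl
      have hcnt : (c :: cs).count k = cs.count k := by
        rw [List.count_cons_of_ne hck]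
      rw [hval, hcnt]

lemma pvInit_keys (devices : List Int) :
    (devices.foldl (fun d device => d.insert device false) PySem.Dict.empty).keys
      = PySem.Set.ofList devices := by
  rw [PySem.Dict.keys_foldl_insert]
  simp [PySem.Set.update, PySem.Set.ofList_eq_foldl, PySem.Dict.keys_empty]

lemma pvInit_getD (devices : List Int) (k : Int) :
    (devices.foldl (fun d device => d.insert device false) PySem.Dict.empty).getD k false
      = false := by
  suffices h : ∀ (d : PySem.Dict Int Bool), (∀ j, d.getD j false = false) →
      (devices.foldl (fun d device => d.insert device false) d).getD k false = false by
    exact h PySem.Dict.empty (fun j => by simp)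
  induction devices with
  | nil => intro d hd; exact hd k
  | cons x xs ih =>
    intro d hd
    refine ih (d.insert x false) (fun j => ?_)
    by_cases hjx : j = x
    · subst hjx; exact PySem.Dict.getD_insert_self d j false false
    · rw [PySem.Dict.getD_insert_of_ne d false false hjx]; exact hd j

lemma pvFilter_map (xs : List Int) (f : Int → Bool) :
    (((xs.map (fun k => (k, f k))).filter (fun p => p.2)).map (fun p => p.1))
      = xs.filter f := by
  induction xs with
  | nil => rfl
  | cons x xs ih =>
    by_cases h : f x = true <;> simp [h, ih]

lemma pvA_eq (devices : List Int) (commands : List Int) :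
    getDeviceStates devices commands
      = PySem.List.sorted
          ((PySem.Set.ofList devices).filter (fun d => commands.count d % 2 == 1))
          (fun x => x) false := by
  unfold getDeviceStates
  set d0 := devices.foldl (fun d device => d.insert device false) PySem.Dict.empty with hd0
  have hstep : (fun d command =>
      if PySem.Dict.contains d command then d.insert command (! d.getD command false) else d)
      = pvStep := by
    funext d c; rfl
  rw [hstep]
  set d1 := commands.foldl pvStep d0 with hd1
  have hkeys : d1.keys = PySem.Set.ofList devices := by
    rw [hd1, pvFold_keys, hd0, pvInit_keys]
  have hnodup : d1.keys.Nodup := by rw [hkeys]; exact PySem.Set.nodup_ofList devices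
  have hitems : d1.items = d1.keys.map (fun k => (k, d1.getD k false)) :=
    PySem.Dict.items_eq_map_keys d1 hnodup false
  have hval : ∀ k ∈ d1.keys, d1.getD k false = (commands.count k % 2 == 1) := by
    intro k hkmem
    have hc : d0.contains k = true := by
      rw [PySem.Dict.contains_iff_mem_keys]
      have : k ∈ d1.keys := hkmem
      rwa [hd1, pvFold_keys] at this
    rw [hd1, pvFold_getD commands d0 k hc, hd0, pvInit_getD]
    simp
  have hmapcongr : d1.keys.map (fun k => (k, d1.getD k false))
      = d1.keys.map (fun k => (k, (commands.count k % 2 == 1))) :=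
    List.map_congr_left (fun k hk => by rw [hval k hk])
  rw [hitems, hmapcongr, hkeys, pvFilter_map]

-- ---- B-side: membership and strict sortedness of the run-length scan ----

-- facts about one run of a sorted list: the tail past the run is sorted and
-- strictly above x, and odd-count membership splits into head-run vs tail
lemma pvRunFacts (x : Int) (xs : List Int)
    (hs : List.Pairwise (· ≤ ·) (x :: xs)) :
    List.Pairwise (· ≤ ·) (xs.dropWhile (· == x))
      ∧ (∀ z ∈ xs.dropWhile (· == x), x < z)
      ∧ (∀ z : Int, (z ∈ x :: xs ∧ (x :: xs).count z % 2 = 1)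
          ↔ (z = x ∧ (1 + (xs.takeWhile (· == x)).length) % 2 = 1)
            ∨ (z ∈ xs.dropWhile (· == x) ∧ (xs.dropWhile (· == x)).count z % 2 = 1)) := by
  set run := xs.takeWhile (· == x) with hrundef
  set rest := xs.dropWhile (· == x) with hrestdef
  have hxle : ∀ y ∈ xs, x ≤ y := (List.pairwise_cons.mp hs).1
  have hxs : List.Pairwise (· ≤ ·) xs := (List.pairwise_cons.mp hs).2
  have hxxs : xs = run ++ rest := (List.takeWhile_append_dropWhile (p := (· == x)) (l := xs)).symm
  have hrun : ∀ z ∈ run, z = x := fun z hz => by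
    have := List.mem_takeWhile_imp hz
    simpa using this
  have hrest_sorted : List.Pairwise (· ≤ ·) rest :=
    List.Pairwise.sublist (List.dropWhile_sublist (· == x)) hxs
  have hrest_sub : ∀ z ∈ rest, z ∈ xs := fun z hz =>
    List.Sublist.subset (List.dropWhile_sublist (· == x)) hz
  have hlt : ∀ z ∈ rest, x < z := by
    intro z hz
    have hne : rest ≠ [] := List.ne_nil_of_mem hz
    have hhead : ((rest.head hne) == x) = false := List.head_dropWhile_not (· == x) hne
    have hheadne : rest.head hne ≠ x := by simpa using hhead
    have hheadmem : rest.head hne ∈ xs := hrest_sub _ (List.head_mem hne)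
    have hxh : x < rest.head hne := lt_of_le_of_ne (hxle _ hheadmem) (Ne.symm hheadne)
    rcases eq_or_ne z (rest.head hne) with h | h
    · rwa [h]
    · have : rest.head hne ≤ z := by
        have hcons : rest = rest.head hne :: rest.tail := (List.cons_head_tail hne).symm
        rw [hcons] at hrest_sorted hz
        rcases List.mem_cons.mp hz with h' | h'
        · exact absurd h' h
        · exact (List.pairwise_cons.mp hrest_sorted).1 z h'
      exact lt_of_lt_of_le hxh this
  have hcx : (x :: xs).count x = 1 + run.length := by
    have h1 : run.count x = run.length :=
      List.count_eq_length.mpr (fun b hb => (hrun b hb).symm)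
    have h2 : rest.count x = 0 := by
      rw [List.count_eq_zero]
      intro hmem
      exact absurd rfl (ne_of_gt (hlt x hmem))
    rw [List.count_cons_self, hxxs, List.count_append, h1, h2]
    omega
  have hcz : ∀ z ∈ rest, (x :: xs).count z = rest.count z := by
    intro z hz
    have hzx : z ≠ x := ne_of_gt (hlt z hz)
    have h1 : run.count z = 0 := by
      rw [List.count_eq_zero]
      intro hmem
      exact hzx (hrun z hmem)
    rw [List.count_cons_of_ne (Ne.symm hzx), hxxs, List.count_append, h1]
    omega
  refine ⟨hrest_sorted, hlt, fun z => ?_⟩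
  rcases eq_or_ne z x with hzx | hzx
  · subst hzx
    have hnotrest : z ∉ rest := fun hmem => absurd rfl (ne_of_gt (hlt z hmem))
    constructor
    · rintro ⟨_, hodd'⟩
      exact Or.inl ⟨rfl, by rw [hcx] at hodd'; omega⟩
    · rintro (⟨_, hodd'⟩ | ⟨hmem, _⟩)
      · exact ⟨List.mem_cons_self, by rw [hcx]; omega⟩
      · exact absurd hmem hnotrest
  · constructor
    · rintro ⟨hmem, hodd'⟩
      rcases List.mem_cons.mp hmem with h | h
      · exact absurd h hzx
      · rw [hxxs] at h
        rcases List.mem_append.mp h with h | h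
        · exact absurd (hrun z h) hzx
        · exact Or.inr ⟨h, by rw [hcz z h] at hodd'; exact hodd'⟩
    · rintro (⟨h, _⟩ | ⟨hmem, hodd'⟩)
      · exact absurd h hzx
      · refine ⟨List.mem_cons_of_mem x ?_, by rw [hcz z hmem]; exact hodd'⟩
        rw [hxxs]; exact List.mem_append_right run hmem

lemma pvScan_spec (l : List Int) (hs : List.Pairwise (· ≤ ·) l) :
    (∀ z : Int, z ∈ pvScan l ↔ z ∈ l ∧ l.count z % 2 = 1)
      ∧ List.Pairwise (· < ·) (pvScan l) := by
  induction l using pvScan.induct with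
  | case1 => simp [pvScan]
  | case2 x xs run rest hodd ih =>
    obtain ⟨hrest_sorted, hlt, hmemiff⟩ := pvRunFacts x xs hs
    obtain ⟨ihm, ihp⟩ := ih hrest_sorted
    have hoddn : (1 + run.length) % 2 = 1 := by simpa using hodd
    have heq : pvScan (x :: xs) = x :: pvScan rest := by
      rw [pvScan]
      split_ifs with h
      · rfl
      · exact absurd hodd h
    refine ⟨fun z => ?_, ?_⟩
    · rw [heq, List.mem_cons, ihm z, hmemiff z]
      constructor
      · rintro (h | h)
        · exact Or.inl ⟨h, hoddn⟩
        · exact Or.inr h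
      · rintro (⟨h, _⟩ | h)
        · exact Or.inl h
        · exact Or.inr h
    · rw [heq, List.pairwise_cons]
      exact ⟨fun z hz => hlt z ((ihm z).mp hz).1, ihp⟩
  | case3 x xs run rest hodd ih =>
    obtain ⟨hrest_sorted, hlt, hmemiff⟩ := pvRunFacts x xs hs
    obtain ⟨ihm, ihp⟩ := ih hrest_sorted
    have hoddn : ¬ (1 + run.length) % 2 = 1 := by simpa using hodd
    have heq : pvScan (x :: xs) = pvScan rest := by
      rw [pvScan]
      split_ifs with h
      · exact absurd h hodd
      · rfl
    refine ⟨fun z => ?_, by rw [heq]; exact ihp⟩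
    rw [heq, ihm z, hmemiff z]
    constructor
    · exact fun h => Or.inr h
    · rintro (⟨_, h⟩ | h)
      · exact absurd h hoddn
      · exact h

-- ===== VERDICT (by name: the statement is the Claim_ definition above) =====
theorem getDeviceStates_spec : Claim_equal_getDeviceStates := by
  intro devices commands _
  unfold Spec_getDeviceStates getDeviceStates_alt
  rw [pvA_eq]
  set S := PySem.Set.ofList devices with hS
  set p : Int → Bool := fun c => PySem.Set.contains S c with hp
  set R := PySem.List.sorted (commands.filter p) (fun x => x) false with hR
  have hRsorted : List.Pairwise (· ≤ ·) R := by
    simpa using PySem.List.sorted_pairwise (commands.filter p) (fun x => x)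
  obtain ⟨hmem, hpair⟩ := pvScan_spec R hRsorted
  have hRcount : ∀ z : Int, R.count z = (commands.filter p).count z := fun z =>
    (PySem.List.sorted_perm (commands.filter p) (fun x => x) false).count_eq z
  apply PySem.List.sorted_eq_of_perm_of_pairwise_lt
  · -- (pvScan R).Perm (S.filter odd)
    have hnodup1 : (pvScan R).Nodup := hpair.imp ne_of_lt
    have hnodup2 : (S.filter (fun d => commands.count d % 2 == 1)).Nodup :=
      (PySem.Set.nodup_ofList devices).filter _
    rw [List.perm_ext_iff_of_nodup hnodup1 hnodup2]
    intro z
    rw [hmem z, List.mem_filter]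
    constructor
    · rintro ⟨hzR, hodd⟩
      have hzf : z ∈ commands.filter p := (PySem.List.mem_sorted _ _ _ z).mp hzR
      have hzp : p z = true := (List.mem_filter.mp hzf).2
      have hcnt : R.count z = commands.count z := by
        rw [hRcount z, List.count_filter hzp]
      refine ⟨?_, ?_⟩
      · have := hzp
        simpa [hp, hS, PySem.Set.contains] using this
      · rw [hcnt] at hodd; simpa using hodd
    · rintro ⟨hzS, hodd⟩
      have hodd' : commands.count z % 2 = 1 := by simpa using hodd
      have hzc : z ∈ commands := by
        have : 0 < commands.count z := by omega
        exact List.count_pos_iff.mp this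
      have hzp : p z = true := by simpa [hp, hS, PySem.Set.contains] using hzS
      have hzf : z ∈ commands.filter p := List.mem_filter.mpr ⟨hzc, hzp⟩
      have hcnt : R.count z = commands.count z := by
        rw [hRcount z, List.count_filter hzp]
      exact ⟨(PySem.List.mem_sorted _ _ _ z).mpr hzf, by rw [hcnt]; exact hodd'⟩
  · exact hpair
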